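-- pv_equiv track=rewrite | github.com/sungyeon-0975/algo_study | 220106/암호화_kisol.py | solution
-- ===== SOURCE A (Python) =====
-- def solution(sentence, keyword, skips):
--     arr = list(sentence)
--     idx_sentence = 0
--     idx_keyword = 0
--     idx_skips = 0
--
--     while idx_sentence < len(arr) + 1 and idx_skips < len(skips):
--         flag = True
--         for _ in range(skips[idx_skips]):
--             if idx_sentence < len(arr) and arr[idx_sentence] == keyword[idx_keyword]:
--                 idx_sentence += 1
--                 break
--             if idx_sentence >= len(arr):
--                 flag = False
--                 break
--             idx_sentence += 1
--
--         if flag: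
--             arr.insert(idx_sentence, keyword[idx_keyword])
--             idx_sentence += 1
--             idx_skips += 1
--             idx_keyword = (idx_keyword + 1) % len(keyword)
--         else:
--             break
--
--     return ''.join(arr)
-- ===== SOURCE B (Python) =====
-- # B: single forward streaming pass over the sentence using str.find to jump to the
-- # next matching character, appending to an output list instead of mid-list inserts.
-- def solution(sentence, keyword, skips):
--     n = len(sentence)
--     parts = []
--     i = 0
--     k = 0
--     for s in skips:
--         c = keyword[k % len(keyword)]
--         if s > 0:
--             p = sentence.find(c, i, min(i + s, n))
--             if p >= 0:
--                 parts.append(sentence[i:p + 1])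
--                 i = p + 1
--             elif i + s <= n:
--                 parts.append(sentence[i:i + s])
--                 i += s
--             else:
--                 parts.append(sentence[i:])
--                 return ''.join(parts)
--         parts.append(c)
--         k += 1
--     parts.append(sentence[i:])
--     return ''.join(parts)
-- ===== Notes on version B (the rewrite author's own statement) =====
-- stated objective: faster
-- what changed: Instead of repeatedly inserting keyword characters into the middle of a mutable list (O(n) per insert) and stepping char-by-char, B streams once over the sentence, jumping to the next matching character with str.find and appending slices plus keyword chars to an output list joined at the end.
-- outside the precondition, e.g. on solution('', '', [1]): A returns '', B raises ZeroDivisionError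
import Mathlib
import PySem

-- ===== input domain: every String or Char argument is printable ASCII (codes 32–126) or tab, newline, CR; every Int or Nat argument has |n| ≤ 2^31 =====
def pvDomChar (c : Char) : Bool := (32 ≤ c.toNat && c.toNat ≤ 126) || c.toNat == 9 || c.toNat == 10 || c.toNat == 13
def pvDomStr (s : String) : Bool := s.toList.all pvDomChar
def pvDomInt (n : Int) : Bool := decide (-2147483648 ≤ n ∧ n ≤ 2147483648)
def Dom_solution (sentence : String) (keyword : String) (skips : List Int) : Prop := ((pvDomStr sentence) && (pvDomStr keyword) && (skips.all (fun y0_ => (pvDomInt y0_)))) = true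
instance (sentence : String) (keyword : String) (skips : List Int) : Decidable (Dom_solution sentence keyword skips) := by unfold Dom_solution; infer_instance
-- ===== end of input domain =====

-- B replaces A's char-by-char scanning with mid-list inserts by one streaming pass
-- using find and slice appends; equivalence of the return values is proved on
-- Pre_solution (where the Python A never raises).

-- ===== PORT A =====
-- the inner `for _ in range(skips[idx_skips])` loop of A: per iteration, consume a
-- matching char and break (flag stays True), or fail when off the end (flag False),
-- or consume one char; returns (flag, idx_sentence)
def aScan (arr : List Char) (c : Char) : Nat → Nat → Bool × Nat
  | idxS, 0 => (true, idxS)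
  | idxS, fuel + 1 =>
    if _h : idxS < arr.length then
      if arr.getD idxS ' ' == c then (true, idxS + 1)
      else aScan arr c (idxS + 1) fuel
    else (false, idxS)

-- the outer while loop over arr / idx_sentence / idx_keyword / remaining skips
def aLoop (keyword : List Char) : List Char → Nat → Nat → List Int → List Char
  | arr, _idxS, _idxK, [] => arr
  | arr, idxS, idxK, s :: rest =>
    if idxS < arr.length + 1 then
      match aScan arr (keyword.getD idxK ' ') idxS s.toNat with
      | (true, i) =>
          aLoop keyword (arr.insertIdx i (keyword.getD idxK ' ')) (i + 1)
            ((idxK + 1) % keyword.length) rest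
      | (false, _) => arr
    else arr

def solution (sentence : String) (keyword : String) (skips : List Int) : String :=
  String.ofList (aLoop keyword.toList sentence.toList 0 0 skips)

-- ===== PORT B =====
-- sentence.find(c, i, e) on the char list (B only calls it with e ≤ length)
def bFind (sen : List Char) (c : Char) (e : Nat) (i : Nat) : Option Nat :=
  if _h : i < e then
    if sen.getD i ' ' == c then some i else bFind sen c e (i + 1)
  else none
termination_by e - i

-- B's streaming pass: output built by appending consumed slices and keyword chars
def bLoop (sen kw : List Char) (n : Nat) : Nat → Nat → List Int → List Char
  | i, _k, [] => sen.drop i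
  | i, k, s :: rest =>
    let c := kw.getD (k % kw.length) ' '
    if 0 < s then
      match bFind sen c (min (i + s.toNat) n) i with
      | some p => (sen.drop i).take (p - i + 1) ++ c :: bLoop sen kw n (p + 1) (k + 1) rest
      | none =>
          if i + s.toNat ≤ n then
            (sen.drop i).take s.toNat ++ c :: bLoop sen kw n (i + s.toNat) (k + 1) rest
          else sen.drop i
    else c :: bLoop sen kw n i (k + 1) rest

def solution_alt (sentence : String) (keyword : String) (skips : List Int) : String :=
  String.ofList (bLoop sentence.toList keyword.toList sentence.toList.length 0 0 skips)

-- ===== PRECONDITION & SPEC =====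
-- Pre_ excludes keyword = "" with a nonempty skips list: there the Python A raises
-- (IndexError / ZeroDivisionError) except on the degenerate empty sentence, on
-- which B's natural keyword lookup itself raises.
def Pre_solution (sentence : String) (keyword : String) (skips : List Int) : Prop :=
  keyword ≠ "" ∨ skips = []
instance (sentence : String) (keyword : String) (skips : List Int) : Decidable (Pre_solution sentence keyword skips) := by unfold Pre_solution; infer_instance

def pvWitness_solution : String × String × List Int := ("hello world", "ok", [1, 3, 0])

def Spec_solution (sentence : String) (keyword : String) (skips : List Int) (out : String) : Prop := out = solution_alt sentence keyword skips
instance (sentence : String) (keyword : String) (skips : List Int) (out : String) : Decidable (Spec_solution sentence keyword skips out) := by unfold Spec_solution; infer_instance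

-- ===== CLAIM (what is proved, stated in full; the proofs are below) =====
def Claim_equal_solution : Prop := ∀ (sentence : String) (keyword : String) (skips : List Int), Dom_solution sentence keyword skips → Pre_solution sentence keyword skips → Spec_solution sentence keyword skips (solution sentence keyword skips)

-- ===== LEMMAS AND PROOFS =====

theorem pv_mod_succ (k L : Nat) : (k % L + 1) % L = (k + 1) % L := by
  conv_rhs => rw [Nat.add_mod]
  rw [Nat.add_mod (k % L) 1, Nat.mod_mod_of_dvd _ (dvd_refl L)]

theorem bFind_some_bounds (sen : List Char) (c : Char) (e : Nat) :
    ∀ d i p, e - i ≤ d → bFind sen c e i = some p → i ≤ p ∧ p < e := by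
  intro d
  induction d with
  | zero =>
      intro i p hd hp
      rw [bFind, dif_neg (by omega)] at hp
      simp at hp
  | succ d ih =>
      intro i p hd hp
      rw [bFind] at hp
      by_cases h : i < e
      · rw [dif_pos h] at hp
        by_cases hc : (sen.getD i ' ' == c) = true
        · rw [if_pos hc] at hp
          simp at hp
          omega
        · rw [if_neg hc] at hp
          have := ih (i + 1) p (by omega) hp
          omega
      · rw [dif_neg h] at hp
        simp at hp

theorem insertIdx_take_drop (l : List Char) (c : Char) :
    ∀ (q : Nat), q ≤ l.length → l.insertIdx q c = l.take q ++ c :: l.drop q := by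
  induction l with
  | nil =>
      intro q hq
      have hq0 : q = 0 := by simpa using hq
      subst hq0
      simp
  | cons x xs ih =>
      intro q hq
      cases q with
      | zero => simp
      | succ q => simp [List.insertIdx_succ_cons, ih q (by simpa using hq)]

theorem insertIdx_shift (acc l : List Char) (q : Nat) (c : Char) :
    (acc ++ l).insertIdx (acc.length + q) c = acc ++ l.insertIdx q c := by
  induction acc with
  | nil => simp
  | cons x xs ih => simp [List.insertIdx_succ_cons, Nat.succ_add, ih]

-- A's inner scan on arr = acc ++ sen.drop i at index |acc| computes what B's find decides
theorem aScan_eq (sen : List Char) (c : Char) :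
    ∀ (s : Nat) (acc : List Char) (i : Nat), i ≤ sen.length →
    aScan (acc ++ sen.drop i) c acc.length s =
      match bFind sen c (min (i + s) sen.length) i with
      | some p => (true, acc.length + (p - i) + 1)
      | none =>
          if i + s ≤ sen.length then (true, acc.length + s)
          else (false, acc.length + (sen.length - i)) := by
  intro s
  induction s with
  | zero =>
      intro acc i hi
      rw [bFind, dif_neg (by omega)]
      simp [aScan, hi]
  | succ s ih =>
      intro acc i hi
      by_cases hin : i < sen.length
      · have harr : (acc ++ sen.drop i).length = acc.length + (sen.length - i) := by simp
        have hget : (acc ++ sen.drop i).getD acc.length ' ' = sen.getD i ' ' := by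
          simp [List.getD, List.getElem?_append_right (Nat.le_refl acc.length)]
        have he : i < min (i + (s + 1)) sen.length := by omega
        conv_rhs => rw [bFind]
        rw [dif_pos he]
        by_cases hc : (sen.getD i ' ' == c) = true
        · rw [if_pos hc]
          rw [aScan, dif_pos (by omega : acc.length < (acc ++ sen.drop i).length)]
          rw [hget, if_pos hc]
          simp
        · rw [if_neg hc]
          rw [aScan, dif_pos (by omega : acc.length < (acc ++ sen.drop i).length)]
          rw [hget, if_neg hc]
          have hcons : sen.drop i = sen.getD i ' ' :: sen.drop (i + 1) := by
            rw [List.drop_eq_getElem_cons hin, List.getD_eq_getElem _ _ hin]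
          have hstep : acc ++ sen.drop i = (acc ++ [sen.getD i ' ']) ++ sen.drop (i + 1) := by
            rw [hcons]; simp
          have hlen : acc.length + 1 = (acc ++ [sen.getD i ' ']).length := by simp
          rw [hstep, hlen, ih (acc ++ [sen.getD i ' ']) (i + 1) (by omega)]
          have hmin : min (i + 1 + s) sen.length = min (i + (s + 1)) sen.length := by omega
          rw [hmin]
          cases hp : bFind sen c (min (i + (s + 1)) sen.length) (i + 1) with
          | some p =>
              have hb := bFind_some_bounds sen c _ _ _ _ (Nat.le_refl _) hp
              simp only [hp]
              simp
              omega
          | none =>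
              simp only [hp]
              by_cases hle : i + (s + 1) ≤ sen.length
              · rw [if_pos (by omega : i + 1 + s ≤ sen.length), if_pos hle]
                simp
                omega
              · rw [if_neg (by omega : ¬ i + 1 + s ≤ sen.length), if_neg hle]
                simp
                omega
      · have hi' : i = sen.length := by omega
        have hdrop : sen.drop i = ([] : List Char) := by simp [hi']
        rw [aScan, dif_neg (by simp [hdrop])]
        rw [bFind, dif_neg (by omega), if_neg (by omega)]
        simp [hi']

-- the main loop correspondence: A's arr is acc ++ (unread sentence), idx_sentence = |acc|
theorem loop_main (kw sen : List Char) :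
    ∀ (rest : List Int) (acc : List Char) (i k : Nat), i ≤ sen.length →
    aLoop kw (acc ++ sen.drop i) acc.length (k % kw.length) rest
      = acc ++ bLoop sen kw sen.length i k rest := by
  intro rest
  induction rest with
  | nil => intro acc i k hi; simp [aLoop, bLoop]
  | cons s rest ih =>
      intro acc i k hi
      have hcond : acc.length < (acc ++ sen.drop i).length + 1 := by simp
      rw [aLoop, if_pos hcond, aScan_eq sen (kw.getD (k % kw.length) ' ') s.toNat acc i hi]
      by_cases hs : 0 < s
      · conv_rhs => rw [bLoop]
        simp only [if_pos hs]
        cases hp : bFind sen (kw.getD (k % kw.length) ' ') (min (i + s.toNat) sen.length) i with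
        | some p =>
            have hb := bFind_some_bounds sen _ _ _ _ _ (Nat.le_refl _) hp
            have hpn : p < sen.length := by omega
            simp only [hp]
            have hq : p - i + 1 ≤ (sen.drop i).length := by simp; omega
            have hins : (acc ++ sen.drop i).insertIdx (acc.length + (p - i) + 1)
                  (kw.getD (k % kw.length) ' ')
                = (acc ++ (sen.drop i).take (p - i + 1) ++ [kw.getD (k % kw.length) ' '])
                    ++ sen.drop (p + 1) := by
              have hdd : (sen.drop i).drop (p - i + 1) = sen.drop (p + 1) := by
                rw [List.drop_drop]
                congr 1
                omega
              rw [show acc.length + (p - i) + 1 = acc.length + (p - i + 1) by omega,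
                  insertIdx_shift, insertIdx_take_drop _ _ _ hq, hdd]
              simp
            rw [hins]
            have hlen : acc.length + (p - i) + 1 + 1
                = (acc ++ (sen.drop i).take (p - i + 1) ++ [kw.getD (k % kw.length) ' ']).length := by
              simp
              omega
            rw [hlen, pv_mod_succ, ih _ (p + 1) (k + 1) (by omega)]
            simp
        | none =>
            simp only [hp]
            by_cases hle : i + s.toNat ≤ sen.length
            · rw [if_pos hle]
              simp only [if_pos hle]
              have hq : s.toNat ≤ (sen.drop i).length := by simp; omega
              have hins : (acc ++ sen.drop i).insertIdx (acc.length + s.toNat)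
                    (kw.getD (k % kw.length) ' ')
                  = (acc ++ (sen.drop i).take s.toNat ++ [kw.getD (k % kw.length) ' '])
                      ++ sen.drop (i + s.toNat) := by
                rw [insertIdx_shift, insertIdx_take_drop _ _ _ hq]
                simp [List.drop_drop]
              rw [hins]
              have hlen : acc.length + s.toNat + 1
                  = (acc ++ (sen.drop i).take s.toNat ++ [kw.getD (k % kw.length) ' ']).length := by
                simp
                omega
              rw [hlen, pv_mod_succ, ih _ (i + s.toNat) (k + 1) (by omega)]
              simp
            · rw [if_neg hle]
              simp only [if_neg hle]
      · have hs0 : s.toNat = 0 := by omega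
        rw [hs0, bFind, dif_neg (by omega), if_pos (by omega : i + 0 ≤ sen.length)]
        conv_rhs => rw [bLoop]
        simp only [if_neg hs]
        have hins : (acc ++ sen.drop i).insertIdx (acc.length + 0) (kw.getD (k % kw.length) ' ')
            = (acc ++ [kw.getD (k % kw.length) ' ']) ++ sen.drop i := by
          rw [insertIdx_shift, insertIdx_take_drop _ _ _ (by simp)]
          simp
        rw [hins]
        have hlen : acc.length + 0 + 1 = (acc ++ [kw.getD (k % kw.length) ' ']).length := by simp
        rw [hlen, pv_mod_succ, ih _ i (k + 1) hi]
        simp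

-- ===== VERDICT (by name: the statement is the Claim_ definition above) =====
theorem solution_spec : Claim_equal_solution := by
  intro sentence keyword skips _hdom _hpre
  unfold Spec_solution solution solution_alt
  have h := loop_main keyword.toList sentence.toList skips [] 0 0 (Nat.zero_le _)
  simp only [List.drop_zero, List.nil_append, List.length_nil, Nat.zero_mod] at h
  exact congrArg String.ofList h
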